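-- pv_equiv track=rewrite | github.com/suwon205/algorithm | 프로그래머스/1/72410. 신규 아이디 추천/신규 아이디 추천.py | rule2and3
-- ===== SOURCE A (Python) =====
-- def rule2and3(str):
--     tempS = ''
--     for c in str:
--         if c.isalpha() or c.isdigit() or c == '-' or c == '_':
--             tempS += c
--         if c == '.':
--             if tempS != '' and tempS[-1] != '.':
--                 tempS += c
--             elif tempS == '':
--                 tempS += c
--     return tempS
-- ===== SOURCE B (Python) =====
-- def rule2and3(str):
--     f = [c for c in str if c.isalpha() or c.isdigit() or c in '-_.']
--     return ''.join(c for prev, c in zip([None] + f, f)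
--                    if not (c == '.' and prev == '.'))
-- ===== Notes on version B (the rewrite author's own statement) =====
-- stated objective: simpler
-- what changed: Replaces A's single stateful loop (accumulator string queried for its last character at each dot) by two stateless passes: a filter keeping the allowed characters, then a zip-with-previous that drops every dot preceded by a dot.
import Mathlib
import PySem

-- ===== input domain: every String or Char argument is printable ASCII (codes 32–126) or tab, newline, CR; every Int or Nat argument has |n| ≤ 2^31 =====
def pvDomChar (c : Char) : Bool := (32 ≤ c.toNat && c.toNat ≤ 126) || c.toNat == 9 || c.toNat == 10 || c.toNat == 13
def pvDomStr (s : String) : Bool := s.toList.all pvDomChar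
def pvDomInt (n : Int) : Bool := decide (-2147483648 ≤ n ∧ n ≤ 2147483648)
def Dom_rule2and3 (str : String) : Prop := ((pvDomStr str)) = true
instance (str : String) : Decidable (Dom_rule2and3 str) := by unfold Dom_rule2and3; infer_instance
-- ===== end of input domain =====

-- B: two stateless passes (filter allowed chars, then drop each dot whose predecessor is a dot
-- via a zip-with-previous) instead of A's single stateful accumulator loop; objective: simpler.

-- ===== shared helper: the allowed-character predicate (used verbatim by both ports' sources) =====
-- B-side helpers
def pvAllowed (c : Char) : Bool :=
  PySem.Chars.isalpha c || PySem.Chars.isdigit c || (c == '-' || c == '_' || c == '.')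

def pvKeep (p : Option Char × Char) : Bool := !(p.2 == '.' && p.1 == some '.')

-- zip([None] + f, f) and keep c unless c == '.' and prev == '.'
def pvDedotZip (f : List Char) : List Char :=
  ((((none : Option Char) :: f.map some).zip f).filter pvKeep).map (·.2)

-- ===== PORT A =====
-- one iteration of A's loop body over the accumulator tempS
def pvStepA (tempS : List Char) (c : Char) : List Char :=
  let t1 := if PySem.Chars.isalpha c || PySem.Chars.isdigit c || c == '-' || c == '_'
            then tempS ++ [c] else tempS
  if c == '.' then
    if t1 ≠ [] ∧ PySem.List.pyGet? t1 (-1) ≠ some '.' then t1 ++ [c]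
    else if t1 = [] then t1 ++ [c]
    else t1
  else t1

def rule2and3 (str : String) : String :=
  String.ofList (str.toList.foldl pvStepA [])

-- ===== PORT B =====
def rule2and3_alt (str : String) : String :=
  String.ofList (pvDedotZip (str.toList.filter pvAllowed))

-- ===== PRECONDITION & SPEC =====
def Spec_rule2and3 (str : String) (out : String) : Prop := out = rule2and3_alt str
instance (str : String) (out : String) : Decidable (Spec_rule2and3 str out) := by unfold Spec_rule2and3; infer_instance

-- ===== CLAIM (what is proved, stated in full; the proofs are below) =====
def Claim_equal_rule2and3 : Prop := ∀ (str : String), Dom_rule2and3 str → Spec_rule2and3 str (rule2and3 str)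

-- ===== LEMMAS AND PROOFS =====

-- generalization of pvDedotZip over the initial previous element
def pvDedotZip' (prev : Option Char) (f : List Char) : List Char :=
  (((prev :: f.map some).zip f).filter pvKeep).map (·.2)

-- proof helper: collapse consecutive dots, tracking the previous (filtered) character
def pvCollapse : Option Char → List Char → List Char
  | _, [] => []
  | prev, c :: rest =>
    if c = '.' ∧ prev = some '.' then pvCollapse (some c) rest
    else c :: pvCollapse (some c) rest

lemma pvZip_eq_collapse (prev : Option Char) (f : List Char) :
    pvDedotZip' prev f = pvCollapse prev f := by
  induction f generalizing prev with
  | nil => simp [pvDedotZip', pvCollapse]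
  | cons c rest ih =>
    simp only [pvDedotZip', List.map_cons, List.zip_cons_cons, List.filter_cons]
    by_cases h : c = '.' ∧ prev = some '.'
    · have hk : pvKeep (prev, c) = false := by simp [pvKeep, h.1, h.2]
      rw [hk]
      simpa [pvCollapse, h.1, h.2, pvDedotZip'] using ih (some c)
    · have hk : pvKeep (prev, c) = true := by
        simp only [pvKeep, Bool.not_eq_eq_eq_not, Bool.not_true, Bool.and_eq_false_iff]
        by_cases hc : c = '.'
        · right; simp only [beq_eq_false_iff_ne, ne_eq]
          intro hp; exact h ⟨hc, hp⟩
        · left; simp [hc]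
      rw [hk]
      simp only [pvCollapse, h, if_false]
      rw [← ih (some c)]
      simp [pvDedotZip']

lemma pvGetLast_pyGet (l : List Char) (h : l ≠ []) :
    PySem.List.pyGet? l (-1) = l.getLast? := by
  match l, h with
  | a :: t, _ =>
    simp [PySem.List.pyGet?, PySem.List.pyIdx?, List.getLast?_eq_getElem?]

lemma pvFoldl_eq_collapse (l : List Char) (acc : List Char) :
    l.foldl pvStepA acc = acc ++ pvCollapse acc.getLast? (l.filter pvAllowed) := by
  induction l generalizing acc with
  | nil => simp [pvCollapse]
  | cons c rest ih =>
    simp only [List.foldl_cons, List.filter_cons]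
    by_cases hdot : c = '.'
    · subst hdot
      have ha : PySem.Chars.isalpha '.' = false := by decide
      have hd : PySem.Chars.isdigit '.' = false := by decide
      have hstep : pvStepA acc '.' =
          if acc ≠ [] ∧ acc.getLast? ≠ some '.' then acc ++ ['.']
          else if acc = [] then acc ++ ['.'] else acc := by
        by_cases hnil : acc = []
        · simp [pvStepA, hnil, ha, hd]
        · simp [pvStepA, hnil, ha, hd, pvGetLast_pyGet acc hnil]
      have hall : pvAllowed '.' = true := by decide
      rw [hall, ih]
      by_cases hnil : acc = []
      · subst hnil
        simp [hstep, pvCollapse]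
      · by_cases hlast : acc.getLast? = some '.'
        · simp [hstep, hnil, hlast, pvCollapse]
        · have h1 : pvStepA acc '.' = acc ++ ['.'] := by simp [hstep, hnil, hlast]
          rw [h1]
          simp [pvCollapse, hlast, List.getLast?_append]
    · by_cases hall : PySem.Chars.isalpha c || PySem.Chars.isdigit c || c == '-' || c == '_'
      · have h1 : pvStepA acc c = acc ++ [c] := by simp [pvStepA, hall, hdot]
        have h2 : pvAllowed c = true := by
          simp only [pvAllowed]; simp only [Bool.or_eq_true] at hall ⊢; tauto
        rw [h1, ih, h2]
        simp [pvCollapse, hdot, List.getLast?_append]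
      · have h1 : pvStepA acc c = acc := by simp [pvStepA, hall, hdot]
        have h2 : pvAllowed c = false := by
          simp only [pvAllowed]
          simp only [Bool.or_eq_true, not_or] at hall
          simp [hall.1.1, hall.1.2, hall.2, hdot]
        rw [h1, h2, ih]
        simp

-- ===== VERDICT (by name: the statement is the Claim_ definition above) =====
theorem rule2and3_spec : Claim_equal_rule2and3 := by
  intro str _
  unfold Spec_rule2and3 rule2and3 rule2and3_alt
  rw [pvFoldl_eq_collapse]
  have : pvDedotZip (str.toList.filter pvAllowed) =
      pvDedotZip' none (str.toList.filter pvAllowed) := rfl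
  rw [this, pvZip_eq_collapse]
  rfl
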